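-- pv_equiv track=rewrite | github.com/jiricodes/pygame_tests | maze/sources/grid.py | find_end_xy
-- ===== SOURCE A (Python) =====
-- def find_end_xy(grid, w, h):
-- 	i = h - 1
-- 	while i > -1:
-- 		k = w - 1
-- 		while k > -1:
-- 			if grid[i][k] == 3:
-- 				return [k, i]
-- 			k -= 1
-- 		i -= 1
-- 	return None
-- ===== SOURCE B (Python) =====
-- def find_end_xy(grid, w, h):
--     res = None
--     for i in range(h):
--         for k in range(w):
--             if grid[i][k] == 3:
--                 res = [k, i]
--     return res
-- ===== Notes on version B (the rewrite author's own statement) =====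
-- stated objective: alternative
-- what changed: Replaces A's reverse (bottom-right to top-left) early-return scan with a single forward row-major pass that overwrites the result on every match, so the last forward match (= A's first reverse match) is returned after the loops finish.
-- outside the precondition, e.g. on find_end_xy([[], [3]], 1, 2): A returns [0, 1], B raises IndexError
import Mathlib
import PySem

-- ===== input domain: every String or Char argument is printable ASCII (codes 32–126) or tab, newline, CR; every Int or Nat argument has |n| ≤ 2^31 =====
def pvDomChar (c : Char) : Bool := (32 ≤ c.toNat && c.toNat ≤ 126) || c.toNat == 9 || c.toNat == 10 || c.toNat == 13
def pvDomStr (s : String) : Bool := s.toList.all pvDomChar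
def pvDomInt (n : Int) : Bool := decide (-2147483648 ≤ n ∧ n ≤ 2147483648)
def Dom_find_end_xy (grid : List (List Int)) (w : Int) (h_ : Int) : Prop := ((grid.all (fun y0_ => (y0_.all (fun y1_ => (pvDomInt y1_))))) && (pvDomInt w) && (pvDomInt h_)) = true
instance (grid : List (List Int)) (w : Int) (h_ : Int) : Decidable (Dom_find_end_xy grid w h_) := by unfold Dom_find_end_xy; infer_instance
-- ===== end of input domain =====

-- B: single forward row-major pass keeping the last match, instead of A's reverse early-return scan
-- (equal return values; A's early return can dodge an IndexError on ragged grids, hence Pre_).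

-- ===== PORT A =====
-- inner 'while k > -1' loop: n+1 steps mean k runs n, n-1, …, 0 (k = w-1 initially);
-- cell access grid[i][k] is PySem.List.pyGet?; inside Pre_ it is always in range.
def pvInnerA (row : List Int) (i : Int) : Nat → Option (List Int)
  | 0 => none
  | n+1 => if PySem.List.pyGet? row (n : Int) == some 3 then some [(n : Int), i] else pvInnerA row i n

-- outer 'while i > -1' loop: n+1 steps mean i runs n, n-1, …, 0 (i = h-1 initially)
def pvOuterA (grid : List (List Int)) (w : Int) : Nat → Option (List Int)
  | 0 => none
  | n+1 =>
      match pvInnerA ((PySem.List.pyGet? grid (n : Int)).getD []) (n : Int) w.toNat with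
      | some r => some r
      | none => pvOuterA grid w n

def find_end_xy (grid : List (List Int)) (w : Int) (h_ : Int) : Option (List Int) :=
  pvOuterA grid w h_.toNat

-- ===== PORT B =====
-- forward pass: for i in range(h): for k in range(w): overwrite res on grid[i][k] == 3
def find_end_xy_alt (grid : List (List Int)) (w : Int) (h_ : Int) : Option (List Int) :=
  (List.range h_.toNat).foldl
    (fun res (i : Nat) =>
      (List.range w.toNat).foldl
        (fun res (k : Nat) =>
          if PySem.List.pyGet? ((PySem.List.pyGet? grid (i : Int)).getD []) (k : Int) == some 3
          then some [(k : Int), (i : Int)] else res)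
        res)
    none

-- ===== PRECONDITION & SPEC =====
-- Pre_ excludes ragged/undersized grids (some accessed row missing or shorter than w):
-- there Python raises IndexError unless A's early return happens to fire first, so whether
-- A returns at all is an accident of its reverse scan order (cite in claim.json).
def Pre_find_end_xy (grid : List (List Int)) (w : Int) (h_ : Int) : Prop :=
  h_ ≤ 0 ∨ w ≤ 0 ∨ (h_ ≤ grid.length ∧ ∀ row ∈ grid.take h_.toNat, w ≤ row.length)

instance (grid : List (List Int)) (w : Int) (h_ : Int) : Decidable (Pre_find_end_xy grid w h_) := by
  unfold Pre_find_end_xy; infer_instance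

def pvWitness_find_end_xy : List (List Int) × Int × Int := ([[0, 3], [1, 0]], 2, 2)

def Spec_find_end_xy (grid : List (List Int)) (w : Int) (h_ : Int) (out : Option (List Int)) : Prop := out = find_end_xy_alt grid w h_
instance (grid : List (List Int)) (w : Int) (h_ : Int) (out : Option (List Int)) : Decidable (Spec_find_end_xy grid w h_ out) := by unfold Spec_find_end_xy; infer_instance

-- ===== CLAIM (what is proved, stated in full; the proofs are below) =====
def Claim_equal_find_end_xy : Prop := ∀ (grid : List (List Int)) (w : Int) (h_ : Int), Dom_find_end_xy grid w h_ → Pre_find_end_xy grid w h_ → Spec_find_end_xy grid w h_ (find_end_xy grid w h_)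

-- ===== LEMMAS AND PROOFS =====

-- the forward inner fold from any accumulator equals: A's reverse inner scan if it matches, else the accumulator
theorem pvInnerFold_eq (row : List Int) (i : Int) (n : Nat) (res : Option (List Int)) :
    (List.range n).foldl
      (fun res k =>
        if PySem.List.pyGet? row ((k : Nat) : Int) == some 3 then some [((k : Nat) : Int), i] else res) res
    = match pvInnerA row i n with
      | some r => some r
      | none => res := by
  induction n generalizing res with
  | zero => simp [pvInnerA]
  | succ n ih =>
      rw [List.range_succ, List.foldl_append]
      simp only [List.foldl_cons, List.foldl_nil, pvInnerA]
      rw [ih]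
      by_cases h : (PySem.List.pyGet? row ((n : Nat) : Int) == some 3) = true
      · rw [if_pos h, if_pos h]
      · rw [if_neg h, if_neg h]

theorem pvOuter_eq (grid : List (List Int)) (w : Int) (n : Nat) :
    (List.range n).foldl
      (fun res i =>
        (List.range w.toNat).foldl
          (fun res k =>
            if PySem.List.pyGet? ((PySem.List.pyGet? grid ((i : Nat) : Int)).getD []) ((k : Nat) : Int) == some 3
            then some [((k : Nat) : Int), ((i : Nat) : Int)] else res)
          res)
      none
    = pvOuterA grid w n := by
  induction n with
  | zero => simp [pvOuterA]
  | succ n ih =>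
      rw [List.range_succ, List.foldl_append]
      simp only [List.foldl_cons, List.foldl_nil, pvOuterA]
      rw [pvInnerFold_eq, ih]

-- ===== VERDICT (by name: the statement is the Claim_ definition above) =====
theorem find_end_xy_spec : Claim_equal_find_end_xy := by
  intro grid w h_ _ _
  unfold Spec_find_end_xy find_end_xy find_end_xy_alt
  exact (pvOuter_eq grid w h_.toNat).symm
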